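-- pv_equiv track=rewrite | github.com/ggdna/seqwalk | src/seqwalk/generation.py | is_necklace
-- ===== SOURCE A (Python) =====
-- def is_necklace(seq):
--     """
--     computes if a sequence is a necklace (as defined in Wong 2017)
--
--     Args:
--         seq: typically list of ints
--     """
--
--     p = 1
--
--     for i in range(1, len(seq)):
--         if seq[i-p] < seq[i]:
--             p = i + 1
--         elif seq[i-p] > seq[i]:
--             return False
--
--     if (len(seq) % (p)) == 0:
--         return True
--     return False
-- ===== SOURCE B (Python) =====
-- def is_necklace(seq):
--     """
--     computes if a sequence is a necklace (as defined in Wong 2017)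
--
--     Args:
--         seq: typically list of ints
--     """
--     return all(seq <= seq[i:] + seq[:i] for i in range(len(seq)))
-- ===== Notes on version B (the rewrite author's own statement) =====
-- stated objective: simpler
-- what changed: Replaced the incremental least-period prefix scan (Duval-style p bookkeeping plus a divisibility test) by the definition itself: seq is a necklace iff it is <= every rotation seq[i:]+seq[:i].
import Mathlib
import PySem

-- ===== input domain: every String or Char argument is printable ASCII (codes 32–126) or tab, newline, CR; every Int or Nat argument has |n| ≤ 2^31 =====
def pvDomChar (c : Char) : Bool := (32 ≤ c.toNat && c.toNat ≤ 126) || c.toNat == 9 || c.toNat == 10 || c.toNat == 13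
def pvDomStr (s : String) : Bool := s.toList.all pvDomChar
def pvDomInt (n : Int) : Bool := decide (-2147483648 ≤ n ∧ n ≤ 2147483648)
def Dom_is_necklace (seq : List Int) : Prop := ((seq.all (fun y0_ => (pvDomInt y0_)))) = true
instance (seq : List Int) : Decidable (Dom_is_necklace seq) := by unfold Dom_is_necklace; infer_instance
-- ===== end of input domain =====

-- B replaces A's incremental least-period scan by the definition itself (seq ≤ every rotation); simpler, not faster.

-- ===== PORT A =====
-- loop `for i in range(1, len(seq))` with early return, counted down by k = remaining iterations;
-- Python's seq[i-p] and seq[i] are always in range here (1 ≤ p ≤ i < len(seq)), so getD 0 is exact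
def goA (s : List Int) : Nat → Nat → Nat → Option Nat
  | 0, _, p => some p
  | k+1, i, p =>
    if s.getD (i - p) 0 < s.getD i 0 then goA s k (i+1) (i+1)
    else if s.getD i 0 < s.getD (i - p) 0 then none
    else goA s k (i+1) p

def is_necklace (seq : List Int) : Bool :=
  match goA seq (seq.length - 1) 1 1 with
  | none => false
  | some p => seq.length % p == 0

-- ===== PORT B =====
-- Python list `<=` (lexicographic, shorter-prefix smaller)
def pyLeList : List Int → List Int → Bool
  | [], _ => true
  | _ :: _, [] => false
  | a :: as, b :: bs => if a < b then true else if b < a then false else pyLeList as bs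

-- seq[i:] + seq[:i]
def rotAt (s : List Int) (i : Nat) : List Int := s.drop i ++ s.take i

def is_necklace_alt (seq : List Int) : Bool :=
  (List.range seq.length).all (fun i => pyLeList seq (rotAt seq i))

-- ===== PRECONDITION & SPEC =====
def Spec_is_necklace (seq : List Int) (out : Bool) : Prop := out = is_necklace_alt seq
instance (seq : List Int) (out : Bool) : Decidable (Spec_is_necklace seq out) := by unfold Spec_is_necklace; infer_instance

-- ===== CLAIM (what is proved, stated in full; the proofs are below) =====
def Claim_equal_is_necklace : Prop := ∀ (seq : List Int), Dom_is_necklace seq → Spec_is_necklace seq (is_necklace seq)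

-- ===== LEMMAS AND PROOFS =====

-- shift q: all positions of [q, m) agree with the position q earlier (q is a period of the length-m prefix)
def AllEq (s : List Int) (q m : Nat) : Prop :=
  ∀ j, q ≤ j → j < m → s.getD (j - q) 0 = s.getD j 0

-- shift q: within [q, m) there is a first mismatch and it reads `earlier < later`
def FirstGt (s : List Int) (q m : Nat) : Prop :=
  ∃ j, q ≤ j ∧ j < m ∧ (∀ j', q ≤ j' → j' < j → s.getD (j' - q) 0 = s.getD j' 0) ∧
    s.getD (j - q) 0 < s.getD j 0

-- some shift has a first mismatch reading `earlier > later` (A's early `return False` witness)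
def FirstLt (s : List Int) : Prop :=
  ∃ q j, 1 ≤ q ∧ q ≤ j ∧ j < s.length ∧
    (∀ j', q ≤ j' → j' < j → s.getD (j' - q) 0 = s.getD j' 0) ∧
    s.getD j 0 < s.getD (j - q) 0

-- loop invariant of A's scan over the prefix of length i, current value p
def LoopInv (s : List Int) (i p : Nat) : Prop :=
  1 ≤ p ∧ p ≤ i ∧ AllEq s p i ∧
  (∀ q, 1 ≤ q → q < i → FirstGt s q i ∨ AllEq s q i) ∧
  (∀ q, 1 ≤ q → q < p → ¬ AllEq s q i)

lemma firstGt_not_allEq {s : List Int} {q m : Nat} (h : FirstGt s q m) : ¬ AllEq s q m := by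
  obtain ⟨j, hqj, hjm, _, hlt⟩ := h
  intro hall
  have := hall j hqj hjm
  omega

lemma allEq_mono {s : List Int} {q m m' : Nat} (h : AllEq s q m) (hm : m' ≤ m) : AllEq s q m' :=
  fun j hq hj => h j hq (lt_of_lt_of_le hj hm)

lemma firstGt_mono {s : List Int} {q m m' : Nat} (h : FirstGt s q m) (hm : m ≤ m') : FirstGt s q m' := by
  obtain ⟨j, h1, h2, h3, h4⟩ := h
  exact ⟨j, h1, lt_of_lt_of_le h2 hm, h3, h4⟩

lemma allEq_mod {s : List Int} {p m : Nat} (h : AllEq s p m) (hp : 1 ≤ p) :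
    ∀ a, a < m → s.getD a 0 = s.getD (a % p) 0 := by
  intro a
  induction a using Nat.strong_induction_on with
  | _ a ih =>
    intro ham
    by_cases hap : a < p
    · rw [Nat.mod_eq_of_lt hap]
    · have h1 := h a (by omega) ham
      have h2 := ih (a - p) (by omega) (by omega)
      have h3 : (a - p) % p = a % p := by
        conv_rhs => rw [show a = (a - p) + p by omega]
        rw [Nat.add_mod_right]
      rw [← h1, h2, h3]

lemma allEq_congr {s : List Int} {p m a b : Nat} (h : AllEq s p m) (hp : 1 ≤ p)
    (ha : a < m) (hb : b < m) (he : a % p = b % p) : s.getD a 0 = s.getD b 0 := by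
  rw [allEq_mod h hp a ha, allEq_mod h hp b hb, he]

-- first letter is minimal among the scanned prefix
lemma inv_first_le {s : List Int} {i p : Nat} (h : LoopInv s i p) :
    ∀ j, j < i → s.getD 0 0 ≤ s.getD j 0 := by
  obtain ⟨hp1, hpi, hper, h3, h4⟩ := h
  intro j hj
  rcases Nat.eq_zero_or_pos j with hj0 | hj0
  · subst hj0; exact le_refl _
  rcases h3 j hj0 hj with hg | ha
  · obtain ⟨j1, hjj1, hj1i, hpre, hlt⟩ := hg
    rcases eq_or_lt_of_le hjj1 with he | hlt2
    · have : j - j = 0 := by omega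
      subst he; rw [this] at hlt; omega
    · have := hpre j (le_refl _) hlt2
      have hz : j - j = 0 := by omega
      rw [hz] at this; omega
  · have := ha j (le_refl _) hj
    have hz : j - j = 0 := by omega
    rw [hz] at this; omega

-- KEY: any other period q (p < q < i) agrees with p one position before the end of the prefix
lemma inv_key {s : List Int} {i p q : Nat} (h : LoopInv s i p) (hq : AllEq s q i)
    (hpq : p < q) (hqi : q < i) : s.getD (i - q) 0 ≤ s.getD (i - p) 0 := by
  obtain ⟨hp1, hpi, hper, h3, h4⟩ := h
  set δ := q - p with hδ
  have hδ1 : 1 ≤ δ := by omega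
  have hδi : δ < i := by omega
  rcases h3 δ hδ1 hδi with hg | ha
  · obtain ⟨j0, hδj0, hj0i, hpre, hlt⟩ := hg
    by_cases hcase : j0 + p < i
    · exfalso
      have e1 : s.getD ((j0 + p) - p) 0 = s.getD (j0 + p) 0 := hper (j0 + p) (by omega) hcase
      have e2 : s.getD ((j0 + p) - q) 0 = s.getD (j0 + p) 0 := hq (j0 + p) (by omega) hcase
      have i1 : (j0 + p) - p = j0 := by omega
      have i2 : (j0 + p) - q = j0 - δ := by omega
      rw [i1] at e1; rw [i2] at e2
      omega
    · -- i - p ≤ j0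
      rcases eq_or_lt_of_le (show i - p ≤ j0 by omega) with he | hlt2
      · rw [← he] at hlt
        have i1 : i - p - δ = i - q := by omega
        rw [i1] at hlt
        omega
      · have := hpre (i - p) (by omega) hlt2
        have i1 : (i - p) - δ = i - q := by omega
        rw [i1] at this
        omega
  · have := ha (i - p) (by omega) (by omega)
    have i1 : (i - p) - δ = i - q := by omega
    rw [i1] at this
    omega

lemma inv_init {s : List Int} : LoopInv s 1 1 := by
  refine ⟨le_refl _, le_refl _, ?_, ?_, ?_⟩
  · intro j h1 h2; omega
  · intro q h1 h2; omega
  · intro q h1 h2; omega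

lemma inv_step_eq {s : List Int} {i p : Nat} (h : LoopInv s i p)
    (heq : s.getD (i - p) 0 = s.getD i 0) : LoopInv s (i+1) p := by
  obtain ⟨hp1, hpi, hper, h3, h4⟩ := h
  have hi1 : 1 ≤ i := by omega
  have hper' : AllEq s p (i+1) := by
    intro j hq hj
    rcases Nat.lt_or_ge j i with hji | hji
    · exact hper j hq hji
    · have : j = i := by omega
      subst this; exact heq
  refine ⟨hp1, by omega, hper', ?_, ?_⟩
  · intro q hq1 hqi1
    rcases Nat.lt_or_ge q i with hqi | hqi
    · rcases h3 q hq1 hqi with hg | ha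
      · exact Or.inl (firstGt_mono hg (by omega))
      · rcases Nat.lt_trichotomy q p with hlt | heqp | hgt
        · exact absurd ha (h4 q hq1 hlt)
        · subst heqp; exact Or.inr hper'
        · have hle := inv_key ⟨hp1, hpi, hper, h3, h4⟩ ha hgt hqi
          rcases eq_or_lt_of_le hle with he | hl
          · refine Or.inr ?_
            intro j hqj hj
            rcases Nat.lt_or_ge j i with hji | hji
            · exact ha j hqj hji
            · have : j = i := by omega
              subst this; rw [he, heq]
          · refine Or.inl ⟨i, by omega, by omega, ?_, ?_⟩
            · intro j' h1 h2; exact ha j' h1 h2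
            · rw [← heq]; exact hl
    · have hqi' : q = i := by omega
      subst hqi'
      have h0 : s.getD 0 0 ≤ s.getD (q - p) 0 := inv_first_le ⟨hp1, hpi, hper, h3, h4⟩ (q - p) (by omega)
      rw [heq] at h0
      rcases eq_or_lt_of_le h0 with he | hl
      · refine Or.inr ?_
        intro j hqj hj
        have : j = q := by omega
        subst this
        have hz : j - j = 0 := by omega
        rw [hz]; exact he
      · refine Or.inl ⟨q, le_refl _, by omega, ?_, ?_⟩
        · intro j' h1 h2; omega
        · have hz : q - q = 0 := by omega
          rw [hz]; exact hl
  · intro q hq1 hqp hall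
    exact h4 q hq1 hqp (allEq_mono hall (by omega))

lemma inv_step_lt {s : List Int} {i p : Nat} (h : LoopInv s i p)
    (hlt : s.getD (i - p) 0 < s.getD i 0) : LoopInv s (i+1) (i+1) := by
  obtain ⟨hp1, hpi, hper, h3, h4⟩ := h
  have hi1 : 1 ≤ i := by omega
  have hall : ∀ q, 1 ≤ q → q < i + 1 → FirstGt s q (i+1) := by
    intro q hq1 hqi1
    rcases Nat.lt_or_ge q i with hqi | hqi
    · rcases h3 q hq1 hqi with hg | ha
      · exact firstGt_mono hg (by omega)
      · rcases Nat.lt_trichotomy q p with hl | he | hg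
        · exact absurd ha (h4 q hq1 hl)
        · subst he
          exact ⟨i, by omega, by omega, (fun j' h1 h2 => ha j' h1 h2), hlt⟩
        · have hle := inv_key ⟨hp1, hpi, hper, h3, h4⟩ ha hg hqi
          exact ⟨i, by omega, by omega, (fun j' h1 h2 => ha j' h1 h2), by omega⟩
    · have : q = i := by omega
      subst this
      have h0 : s.getD 0 0 ≤ s.getD (q - p) 0 := inv_first_le ⟨hp1, hpi, hper, h3, h4⟩ (q - p) (by omega)
      refine ⟨q, le_refl _, by omega, ?_, ?_⟩
      · intro j' h1 h2; omega
      · have hz : q - q = 0 := by omega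
        rw [hz]; omega
  refine ⟨by omega, le_refl _, ?_, ?_, ?_⟩
  · intro j h1 h2; omega
  · intro q h1 h2; exact Or.inl (hall q h1 h2)
  · intro q h1 h2 hAE; exact firstGt_not_allEq (hall q h1 h2) hAE

lemma goA_main (s : List Int) : ∀ (k i p : Nat), k + i = s.length → LoopInv s i p →
    (∀ p', goA s k i p = some p' → LoopInv s s.length p') ∧ (goA s k i p = none → FirstLt s) := by
  intro k
  induction k with
  | zero =>
    intro i p hk hinv
    constructor
    · intro p' hp'
      simp only [goA] at hp'
      have : i = s.length := by omega
      subst this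
      cases hp'
      exact hinv
    · intro hnone; simp [goA] at hnone
  | succ k ih =>
    intro i p hk hinv
    have hin : i < s.length := by omega
    simp only [goA]
    by_cases h1 : s.getD (i - p) 0 < s.getD i 0
    · rw [if_pos h1]
      exact ih (i+1) (i+1) (by omega) (inv_step_lt hinv h1)
    · rw [if_neg h1]
      by_cases h2 : s.getD i 0 < s.getD (i - p) 0
      · rw [if_pos h2]
        constructor
        · intro p' hp'; cases hp'
        · intro _
          obtain ⟨hp1, hpi, hper, h3, h4⟩ := hinv
          exact ⟨p, i, hp1, hpi, hin, (fun j' ha hb => hper j' ha hb), h2⟩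
      · rw [if_neg h2]
        exact ih (i+1) p (by omega) (inv_step_eq hinv (by omega))

-- lexicographic comparison via pointwise data
lemma pyLe_of_pointwise_eq : ∀ (a b : List Int), a.length = b.length →
    (∀ k, k < a.length → a.getD k 0 = b.getD k 0) → pyLeList a b = true := by
  intro a
  induction a with
  | nil => intro b _ _; simp [pyLeList]
  | cons x xs ih =>
    intro b hl hp
    cases b with
    | nil => simp at hl
    | cons y ys =>
      have hx : x = y := by have := hp 0 (by simp); simpa using this
      subst hx
      simp only [pyLeList, lt_irrefl, if_false]
      apply ih ys (by simpa using hl)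
      intro k hk
      have := hp (k+1) (by simpa using Nat.succ_lt_succ hk)
      simpa using this

lemma pyLe_of_lt : ∀ (k : Nat) (a b : List Int), k < a.length → k < b.length →
    (∀ j, j < k → a.getD j 0 = b.getD j 0) → a.getD k 0 < b.getD k 0 → pyLeList a b = true := by
  intro k
  induction k with
  | zero =>
    intro a b ha hb _ hlt
    cases a with
    | nil => simp at ha
    | cons x xs =>
      cases b with
      | nil => simp at hb
      | cons y ys =>
        have : x < y := by simpa using hlt
        simp [pyLeList, this]
  | succ k ih =>
    intro a b ha hb hpre hlt
    cases a with
    | nil => simp at ha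
    | cons x xs =>
      cases b with
      | nil => simp at hb
      | cons y ys =>
        have hx : x = y := by have := hpre 0 (by omega); simpa using this
        subst hx
        simp only [pyLeList, lt_irrefl, if_false]
        apply ih xs ys (by simpa using ha) (by simpa using hb)
        · intro j hj
          have := hpre (j+1) (by omega)
          simpa using this
        · simpa using hlt

lemma pyLe_of_gt : ∀ (k : Nat) (a b : List Int), k < a.length → k < b.length →
    (∀ j, j < k → a.getD j 0 = b.getD j 0) → b.getD k 0 < a.getD k 0 → pyLeList a b = false := by
  intro k
  induction k with
  | zero =>
    intro a b ha hb _ hlt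
    cases a with
    | nil => simp at ha
    | cons x xs =>
      cases b with
      | nil => simp at hb
      | cons y ys =>
        have hyx : y < x := by simpa using hlt
        have : ¬ x < y := by omega
        simp [pyLeList, this, hyx]
  | succ k ih =>
    intro a b ha hb hpre hlt
    cases a with
    | nil => simp at ha
    | cons x xs =>
      cases b with
      | nil => simp at hb
      | cons y ys =>
        have hx : x = y := by have := hpre 0 (by omega); simpa using this
        subst hx
        simp only [pyLeList, lt_irrefl, if_false]
        apply ih xs ys (by simpa using ha) (by simpa using hb)
        · intro j hj
          have := hpre (j+1) (by omega)
          simpa using this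
        · simpa using hlt

lemma rot_length (s : List Int) (r : Nat) : (rotAt s r).length = s.length := by
  simp [rotAt]; omega

lemma rot_getD (s : List Int) (r j : Nat) (hr : r ≤ s.length) (hj : j < s.length) :
    (rotAt s r).getD j 0 =
      if j < s.length - r then s.getD (r + j) 0 else s.getD (j - (s.length - r)) 0 := by
  unfold rotAt
  rw [List.getD_eq_getElem?_getD, List.getD_eq_getElem?_getD, List.getD_eq_getElem?_getD]
  by_cases hcase : j < s.length - r
  · rw [if_pos hcase]
    rw [List.getElem?_append_left (by simpa using hcase)]
    rw [List.getElem?_drop]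
  · rw [if_neg hcase]
    rw [List.getElem?_append_right (by simp; omega)]
    rw [List.length_drop]
    rw [List.getElem?_take_of_lt (by omega)]

lemma rot_getD_mod (s : List Int) (r j : Nat) (hr : r ≤ s.length) (hj : j < s.length) :
    (rotAt s r).getD j 0 = s.getD ((j + r) % s.length) 0 := by
  rw [rot_getD s r j hr hj]
  by_cases hcase : j < s.length - r
  · rw [if_pos hcase, Nat.mod_eq_of_lt (by omega), Nat.add_comm]
  · rw [if_neg hcase]
    have h1 : s.length ≤ j + r := by omega
    rw [Nat.mod_eq_sub_mod h1, Nat.mod_eq_of_lt (by omega)]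
    congr 1
    omega

lemma alt_false_of_witness {s : List Int} (r : Nat) (hr : r < s.length)
    (hf : pyLeList s (rotAt s r) = false) : is_necklace_alt s = false := by
  unfold is_necklace_alt
  cases hall : (List.range s.length).all (fun i => pyLeList s (rotAt s i)) with
  | false => rfl
  | true =>
    exfalso
    have := List.all_eq_true.mp hall r (List.mem_range.mpr hr)
    rw [hf] at this
    exact Bool.false_ne_true this

lemma alt_false_of_firstLt {s : List Int} (h : FirstLt s) : is_necklace_alt s = false := by
  obtain ⟨q, j, hq1, hqj, hjn, hpre, hlt⟩ := h
  apply alt_false_of_witness q (by omega)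
  apply pyLe_of_gt (j - q) s (rotAt s q) (by omega) (by rw [rot_length]; omega)
  · intro m hm
    rw [rot_getD s q m (by omega) (by omega), if_pos (by omega)]
    have h := hpre (q + m) (by omega) (by omega)
    have hz : q + m - q = m := by omega
    rw [hz] at h
    exact h
  · rw [rot_getD s q (j - q) (by omega) (by omega), if_pos (by omega)]
    have : q + (j - q) = j := by omega
    rw [this]
    exact hlt

lemma alt_true_of_inv {s : List Int} {p : Nat} (h : LoopInv s s.length p) (hdvd : p ∣ s.length) :
    is_necklace_alt s = true := by
  obtain ⟨hp1, hpn, hper, h3, h4⟩ := h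
  have hn1 : 1 ≤ s.length := by omega
  unfold is_necklace_alt
  rw [List.all_eq_true]
  intro r hrmem
  have hr : r < s.length := List.mem_range.mp hrmem
  by_cases hdr : p ∣ r
  · -- rotation by a multiple of p is s itself, elementwise
    apply pyLe_of_pointwise_eq s (rotAt s r) (by rw [rot_length])
    intro k hk
    rw [rot_getD_mod s r k (by omega) hk]
    apply allEq_congr hper hp1 hk (Nat.mod_lt _ (by omega))
    rw [Nat.mod_mod_of_dvd _ hdvd, Nat.add_mod, Nat.mod_eq_zero_of_dvd hdr]
    simp
  · -- reduce r mod p; the strict first mismatch of shift (r % p) makes the rotation strictly bigger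
    have hr'1 : 1 ≤ r % p := by
      rcases Nat.eq_zero_or_pos (r % p) with h0 | h0
      · exact absurd (Nat.dvd_of_mod_eq_zero h0) hdr
      · omega
    have hr'p : r % p < p := Nat.mod_lt _ (by omega)
    have hfg : FirstGt s (r % p) s.length := by
      rcases h3 (r % p) hr'1 (by omega) with hg | ha
      · exact hg
      · exact absurd ha (h4 (r % p) hr'1 hr'p)
    obtain ⟨j, hrj, hjn, hpre, hlt⟩ := hfg
    have hcongr : ∀ m, m < s.length → m + r % p < s.length →
        (rotAt s r).getD m 0 = s.getD (m + r % p) 0 := by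
      intro m hm hm2
      rw [rot_getD_mod s r m (by omega) hm]
      apply allEq_congr hper hp1 (Nat.mod_lt _ (by omega)) hm2
      rw [Nat.mod_mod_of_dvd _ hdvd, Nat.add_mod, Nat.add_mod m (r % p), Nat.mod_mod_of_dvd _ (dvd_refl p)]
    apply pyLe_of_lt (j - r % p) s (rotAt s r) (by omega) (by rw [rot_length]; omega)
    · intro m hm
      rw [hcongr m (by omega) (by omega)]
      have := hpre (m + r % p) (by omega) (by omega)
      have hz : m + r % p - r % p = m := by omega
      rw [hz] at this
      exact this
    · rw [hcongr (j - r % p) (by omega) (by omega)]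
      have hz : j - r % p + r % p = j := by omega
      rw [hz]
      exact hlt

lemma alt_false_of_not_dvd {s : List Int} {p : Nat} (h : LoopInv s s.length p) (hnd : ¬ p ∣ s.length) :
    is_necklace_alt s = false := by
  obtain ⟨hp1, hpn, hper, h3, h4⟩ := h
  have hn1 : 1 ≤ s.length := by omega
  set n := s.length with hn
  have hr01 : 1 ≤ n % p := by
    rcases Nat.eq_zero_or_pos (n % p) with h0 | h0
    · exact absurd (Nat.dvd_of_mod_eq_zero h0) hnd
    · omega
  have hr0p : n % p < p := Nat.mod_lt _ (by omega)
  have hfg : FirstGt s (n % p) n := by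
    rcases h3 (n % p) hr01 (by omega) with hg | ha
    · exact hg
    · exact absurd ha (h4 (n % p) hr01 hr0p)
  obtain ⟨j, hrj, hjn, hpre, hlt⟩ := hfg
  -- rotate by r = n - n % p, a multiple of p
  have hpr : p ∣ (n - n % p) := by
    have := Nat.div_add_mod n p
    exact ⟨n / p, by omega⟩
  apply alt_false_of_witness (n - n % p) (by omega)
  apply pyLe_of_gt j s (rotAt s (n - n % p)) (by omega) (by rw [rot_length]; omega)
  · intro m hm
    rw [rot_getD s (n - n % p) m (by omega) (by omega)]
    have hnr : n - (n - n % p) = n % p := by omega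
    rw [hnr]
    by_cases hcase : m < n % p
    · rw [if_pos hcase]
      exact (allEq_congr hper hp1 (show n - n % p + m < n by omega) (by omega)
        (by rw [Nat.add_mod, (Nat.mod_eq_zero_of_dvd hpr), Nat.zero_add, Nat.mod_mod_of_dvd _ (dvd_refl p)])).symm
    · rw [if_neg hcase]
      exact (hpre m (by omega) hm).symm
  · rw [rot_getD s (n - n % p) j (by omega) (by omega)]
    have hnr : n - (n - n % p) = n % p := by omega
    rw [hnr, if_neg (by omega)]
    exact hlt

lemma is_necklace_eq_alt (s : List Int) : is_necklace s = is_necklace_alt s := by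
  cases hn : s.length with
  | zero =>
    have : s = [] := List.length_eq_zero_iff.mp hn
    subst this
    rfl
  | succ m =>
    have hmain := goA_main s m 1 1 (by omega) inv_init
    unfold is_necklace
    cases hg : goA s (s.length - 1) 1 1 with
    | none =>
      have hg' : goA s m 1 1 = none := by rw [show m = s.length - 1 by omega]; exact hg
      rw [(alt_false_of_firstLt (hmain.2 hg'))]
    | some p =>
      have hg' : goA s m 1 1 = some p := by rw [show m = s.length - 1 by omega]; exact hg
      have hinv := hmain.1 p hg'
      by_cases hd : p ∣ s.length
      · rw [alt_true_of_inv hinv hd]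
        simp [Nat.mod_eq_zero_of_dvd hd]
      · rw [alt_false_of_not_dvd hinv hd]
        have hne : s.length % p ≠ 0 := fun h => hd (Nat.dvd_of_mod_eq_zero h)
        simp [hne]

-- ===== VERDICT (by name: the statement is the Claim_ definition above) =====
theorem is_necklace_spec : Claim_equal_is_necklace := by
  intro seq _
  show is_necklace seq = is_necklace_alt seq
  exact is_necklace_eq_alt seq
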